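-- pv_equiv track=rewrite | github.com/thuhaung/thesis_report_management_system | chapter_title/processor.py | get_missing_titles
-- ===== SOURCE A (Python) =====
-- def get_missing_titles(template_titles, chapter_titles):
--     missing_titles = template_titles[:]
--
--     for template_chapter in template_titles:
--         template_title = " ".join(template_chapter.split(" ")[:2])
--
--         for chapter_title in chapter_titles:
--             if template_title in chapter_title:
--                 if template_chapter in missing_titles:
--                     missing_titles.remove(template_chapter)
--
--     return missing_titles
-- ===== SOURCE B (Python) =====
-- def get_missing_titles(template_titles, chapter_titles):
--     def prefix(t):
--         return " ".join(t.split(" ")[:2])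
--
--     prefixes = {prefix(t) for t in template_titles}
--     matched = {p for p in prefixes if any(p in c for c in chapter_titles)}
--     return [t for t in template_titles if prefix(t) not in matched]
-- ===== Notes on version B (the rewrite author's own statement) =====
-- stated objective: faster
-- what changed: Replaces A's copy-then-repeatedly-remove mutation (a nested scan with a linear membership test and linear remove inside) by building once the set of distinct two-word prefixes that occur in some chapter title and then filtering the template list against that set.
import Mathlib
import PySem

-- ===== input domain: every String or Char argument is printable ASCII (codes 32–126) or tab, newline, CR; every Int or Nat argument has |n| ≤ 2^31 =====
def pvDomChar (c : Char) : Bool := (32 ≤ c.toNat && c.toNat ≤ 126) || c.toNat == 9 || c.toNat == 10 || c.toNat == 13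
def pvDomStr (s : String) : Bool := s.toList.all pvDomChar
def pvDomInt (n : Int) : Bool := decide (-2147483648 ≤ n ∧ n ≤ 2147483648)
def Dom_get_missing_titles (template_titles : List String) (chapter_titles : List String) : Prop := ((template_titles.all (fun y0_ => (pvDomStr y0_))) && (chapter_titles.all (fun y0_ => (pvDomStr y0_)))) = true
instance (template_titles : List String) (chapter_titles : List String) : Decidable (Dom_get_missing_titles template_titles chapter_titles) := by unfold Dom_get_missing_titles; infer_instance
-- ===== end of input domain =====

-- B replaces A's copy-then-repeatedly-remove mutation by a build-a-matched-prefix-set-then-filter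
-- decomposition (objective: faster by a constant-factor mechanism: no repeated linear membership/remove passes).

-- ===== PORT A =====
def get_missing_titles (template_titles : List String) (chapter_titles : List String) : List String :=
  template_titles.foldl (fun missing_titles template_chapter =>
    -- template_title = " ".join(template_chapter.split(" ")[:2])
    let template_title := PySem.Str.join " " (((PySem.Str.split? template_chapter " ").getD []).take 2)
    chapter_titles.foldl (fun missing_titles chapter_title =>
      if PySem.Str.isIn template_title chapter_title then
        if missing_titles.contains template_chapter then
          -- missing_titles.remove(template_chapter); guarded, so remove? is always `some`
          (PySem.List.remove? missing_titles template_chapter).getD missing_titles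
        else missing_titles
      else missing_titles) missing_titles) template_titles

-- ===== PORT B =====
-- prefix(t) = " ".join(t.split(" ")[:2])
def pvPrefixB (t : String) : String :=
  PySem.Str.join " " (((PySem.Str.split? t " ").getD []).take 2)

def get_missing_titles_alt (template_titles : List String) (chapter_titles : List String) : List String :=
  let prefixes : PySem.Set String := PySem.Set.ofList (template_titles.map pvPrefixB)
  let matched : PySem.Set String :=
    prefixes.filter (fun p => chapter_titles.any (fun c => PySem.Str.isIn p c))
  template_titles.filter (fun t => !matched.contains (pvPrefixB t))

-- ===== PRECONDITION & SPEC =====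
def Spec_get_missing_titles (template_titles : List String) (chapter_titles : List String) (out : List String) : Prop := out = get_missing_titles_alt template_titles chapter_titles
instance (template_titles : List String) (chapter_titles : List String) (out : List String) : Decidable (Spec_get_missing_titles template_titles chapter_titles out) := by unfold Spec_get_missing_titles; infer_instance

-- ===== CLAIM (what is proved, stated in full; the proofs are below) =====
def Claim_equal_get_missing_titles : Prop := ∀ (template_titles : List String) (chapter_titles : List String), Dom_get_missing_titles template_titles chapter_titles → Spec_get_missing_titles template_titles chapter_titles (get_missing_titles template_titles chapter_titles)

-- ===== LEMMAS AND PROOFS =====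

-- `pvM cs t` : the two-word prefix of t occurs in some chapter title
def pvM (cs : List String) (t : String) : Bool :=
  cs.any (fun c => PySem.Str.isIn (pvPrefixB t) c)

-- `pvK cs t` : how many chapter titles contain the prefix of t
def pvK (cs : List String) (t : String) : Nat :=
  cs.countP (fun c => PySem.Str.isIn (pvPrefixB t) c)

-- the guarded-remove step of A, and A's inner loop over the chapters
def pvRm (t : String) (m : List String) : List String :=
  if m.contains t then (PySem.List.remove? m t).getD m else m

def pvInner (cs : List String) (t : String) (m : List String) : List String :=
  cs.foldl (fun missing c => if PySem.Str.isIn (pvPrefixB t) c then pvRm t missing else missing) m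

lemma pvRm_eq_erase (t : String) (m : List String) :
    pvRm t m = if t ∈ m then m.erase t else m := by
  unfold pvRm
  by_cases h : t ∈ m
  · rw [PySem.List.remove?_eq_some_erase m t h, List.contains_iff_mem.mpr h]
    simp
  · simp [h]

lemma pvRm_count_self (t : String) (m : List String) :
    (pvRm t m).count t = m.count t - 1 := by
  rw [pvRm_eq_erase]
  by_cases h : t ∈ m
  · simp [h, List.count_erase_self]
  · simp [h, List.count_eq_zero.mpr h]

lemma pvRm_count_ne {v t : String} (h : v ≠ t) (m : List String) :
    (pvRm t m).count v = m.count v := by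
  rw [pvRm_eq_erase]
  by_cases hm : t ∈ m
  · simp [hm, List.count_erase_of_ne h]
  · simp [hm]

lemma erase_filter_of_not {t : String} {q : String → Bool} (hq : q t = false) :
    ∀ (m : List String), (m.erase t).filter q = m.filter q := by
  intro m
  induction m with
  | nil => simp
  | cons a m ih =>
    by_cases ha : a = t
    · subst ha; simp [hq]
    · rw [List.erase_cons]
      simp only [beq_iff_eq, ha, if_false, List.filter_cons]
      rw [ih]

lemma pvRm_filter {t : String} {q : String → Bool} (hq : q t = false) (m : List String) :
    (pvRm t m).filter q = m.filter q := by
  rw [pvRm_eq_erase]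
  by_cases h : t ∈ m
  · simp [h, erase_filter_of_not hq]
  · simp [h]

lemma pvK_cons_pos {c t : String} {cs : List String}
    (h : PySem.Str.isIn (pvPrefixB t) c = true) : pvK (c :: cs) t = pvK cs t + 1 := by
  have hch : PySem.Chars.isIn (pvPrefixB t).toList c.toList = true := by simpa using h
  simp [pvK, hch]

lemma pvK_cons_neg {c t : String} {cs : List String}
    (h : ¬ PySem.Str.isIn (pvPrefixB t) c = true) : pvK (c :: cs) t = pvK cs t := by
  have hch : PySem.Chars.isIn (pvPrefixB t).toList c.toList = false := by
    cases hx : PySem.Str.isIn (pvPrefixB t) c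
    · simpa using hx
    · exact absurd hx h
  simp [pvK, hch]

lemma pvInner_count_self (cs : List String) (t : String) :
    ∀ m : List String, (pvInner cs t m).count t = m.count t - pvK cs t := by
  induction cs with
  | nil => intro m; simp [pvInner, pvK]
  | cons c cs ih =>
    intro m
    by_cases h : PySem.Str.isIn (pvPrefixB t) c = true
    · rw [pvK_cons_pos h]
      simp only [pvInner, List.foldl_cons, h, if_true]
      rw [show (List.foldl _ (pvRm t m) cs) = pvInner cs t (pvRm t m) from rfl, ih,
        pvRm_count_self]
      omega
    · rw [pvK_cons_neg h]
      simp only [pvInner, List.foldl_cons, h]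
      exact ih m

lemma pvInner_count_ne (cs : List String) {v t : String} (h : v ≠ t) :
    ∀ m : List String, (pvInner cs t m).count v = m.count v := by
  induction cs with
  | nil => intro m; simp [pvInner]
  | cons c cs ih =>
    intro m
    simp only [pvInner, List.foldl_cons]
    by_cases hc : PySem.Str.isIn (pvPrefixB t) c = true
    · simp only [hc, if_true]
      rw [show (List.foldl _ (pvRm t m) cs) = pvInner cs t (pvRm t m) from rfl, ih,
        pvRm_count_ne h]
    · simp only [hc]
      exact ih m

lemma pvInner_filter (cs : List String) {t : String} {q : String → Bool}
    (hq : q t = false) : ∀ m : List String, (pvInner cs t m).filter q = m.filter q := by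
  induction cs with
  | nil => intro m; simp [pvInner]
  | cons c cs ih =>
    intro m
    simp only [pvInner, List.foldl_cons]
    by_cases hc : PySem.Str.isIn (pvPrefixB t) c = true
    · simp only [hc, if_true]
      rw [show (List.foldl _ (pvRm t m) cs) = pvInner cs t (pvRm t m) from rfl, ih,
        pvRm_filter hq]
    · simp only [hc]
      exact ih m

lemma pvInner_id {cs : List String} {t : String} (h : pvM cs t = false)
    (m : List String) : pvInner cs t m = m := by
  unfold pvM at h
  rw [List.any_eq_false] at h
  unfold pvInner
  rw [PySem.List.foldl_congr_mem _ _ (fun acc _ => acc) _ ?_, PySem.List.foldl_ignore]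
  intro acc c hc
  have hf : PySem.Str.isIn (pvPrefixB t) c = false := by
    cases hx : PySem.Str.isIn (pvPrefixB t) c
    · rfl
    · exact absurd hx (h c hc)
  rw [hf]
  simp

lemma pvK_pos {cs : List String} {t : String} (h : pvM cs t = true) : 0 < pvK cs t := by
  unfold pvM at h; rw [List.any_eq_true] at h
  exact List.countP_pos_iff.mpr h

lemma count_cons_ne (v t : String) (ts : List String) (hvt : v ≠ t) :
    List.count v (t :: ts) = List.count v ts := by
  simp [Ne.symm hvt]

lemma pvOuter (cs : List String) : ∀ (ts s : List String),
    (∀ v, pvM cs v = true → s.count v ≤ ts.count v * pvK cs v) →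
    ts.foldl (fun m t => pvInner cs t m) s = s.filter (fun t => !pvM cs t) := by
  intro ts
  induction ts with
  | nil =>
    intro s h
    rw [List.foldl_nil, eq_comm, List.filter_eq_self]
    intro a ha
    by_contra hu
    have hM : pvM cs a = true := by
      cases hx : pvM cs a <;> simp [hx] at hu ⊢
    have := h a hM
    simp only [List.count_nil, Nat.zero_mul, Nat.le_zero] at this
    exact absurd ((List.count_pos_iff).mpr ha) (by omega)
  | cons t ts ih =>
    intro s h
    rw [List.foldl_cons]
    by_cases hM : pvM cs t = true
    · have hstep : ∀ v, pvM cs v = true →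
          (pvInner cs t s).count v ≤ ts.count v * pvK cs v := by
        intro v hv
        by_cases hvt : v = t
        · subst hvt
          rw [pvInner_count_self]
          have hc := h v hv
          rw [List.count_cons_self, Nat.add_mul, Nat.one_mul] at hc
          omega
        · rw [pvInner_count_ne cs hvt]
          have hc := h v hv
          rw [count_cons_ne v t ts hvt] at hc
          exact hc
      rw [ih (pvInner cs t s) hstep,
        pvInner_filter cs (q := fun t => !pvM cs t) (by simp [hM]) s]
    · have hMf : pvM cs t = false := by
        cases hx : pvM cs t
        · rfl
        · exact absurd hx hM
      rw [pvInner_id hMf s]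
      apply ih
      intro v hv
      have hc := h v hv
      by_cases hvt : v = t
      · subst hvt; exact absurd hv hM
      · rw [count_cons_ne v t ts hvt] at hc
        exact hc

lemma portA_eq_filter (ts cs : List String) :
    get_missing_titles ts cs = ts.filter (fun t => !pvM cs t) := by
  have hfold : get_missing_titles ts cs = ts.foldl (fun m t => pvInner cs t m) ts := rfl
  rw [hfold]
  apply pvOuter
  intro v hv
  exact Nat.le_mul_of_pos_right _ (pvK_pos hv)

lemma portB_eq_filter (ts cs : List String) :
    get_missing_titles_alt ts cs = ts.filter (fun t => !pvM cs t) := by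
  unfold get_missing_titles_alt
  apply List.filter_congr
  intro t ht
  have hmem : pvPrefixB t ∈ PySem.Set.ofList (ts.map pvPrefixB) :=
    (PySem.Set.mem_ofList _ _).mpr (List.mem_map_of_mem ht)
  have hiff : PySem.Set.contains
      ((PySem.Set.ofList (ts.map pvPrefixB)).filter
        (fun p => cs.any (fun c => PySem.Str.isIn p c))) (pvPrefixB t) = pvM cs t := by
    cases hM : pvM cs t with
    | true =>
      rw [PySem.Set.contains_iff]
      rw [List.mem_filter]
      exact ⟨hmem, hM⟩
    | false =>
      cases hx : PySem.Set.contains ((PySem.Set.ofList (ts.map pvPrefixB)).filter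
          (fun p => cs.any (fun c => PySem.Str.isIn p c))) (pvPrefixB t)
      · rfl
      · have := (List.mem_filter.mp ((PySem.Set.contains_iff _ _).mp hx)).2
        rw [show (cs.any (fun c => PySem.Str.isIn (pvPrefixB t) c)) = pvM cs t from rfl, hM]
          at this
        exact absurd this (by simp)
  rw [hiff]

-- ===== VERDICT (by name: the statement is the Claim_ definition above) =====
theorem get_missing_titles_spec : Claim_equal_get_missing_titles := by
  intro ts cs _
  unfold Spec_get_missing_titles
  rw [portA_eq_filter, portB_eq_filter]
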